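-- pv_equiv track=rewrite | github.com/BennyJane/algorithm_mad | leetcode/array/windows/simple.py | findTheLongestSubstring2
-- ===== SOURCE A (Python) =====
-- def findTheLongestSubstring2(s: str) -> int:
--     n = len(s)
--     d = {
--         "a": 0,
--         "e": 1,
--         "i": 2,
--         "o": 3,
--         "u": 4
--     }
--
--     ans = 0
--     for i in range(n):
--         array = [True for _ in range(5)]
--         for j in range(i, n):
--             c = s[j]
--             if c in d.keys():
--                 index = d[c]
--                 array[index] = not array[index]
--             if all(array):
--                 ans = max(ans, j - i + 1)
--     return ans
-- ===== SOURCE B (Python) =====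
-- def findTheLongestSubstring2(s: str) -> int:
--     bit = {"a": 1, "e": 2, "i": 4, "o": 8, "u": 16}
--     first = {0: -1}
--     cur = 0
--     ans = 0
--     for i, c in enumerate(s):
--         cur ^= bit.get(c, 0)
--         if cur in first:
--             ans = max(ans, i - first[cur])
--         else:
--             first[cur] = i
--     return ans
-- ===== Notes on version B (the rewrite author's own statement) =====
-- stated objective: faster
-- what changed: Replaced the O(n^2) restart-at-every-index window scan with a single left-to-right pass that keeps a 5-bit prefix vowel-parity bitmask and a dict mapping each mask to its first occurrence index.
import Mathlib
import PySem

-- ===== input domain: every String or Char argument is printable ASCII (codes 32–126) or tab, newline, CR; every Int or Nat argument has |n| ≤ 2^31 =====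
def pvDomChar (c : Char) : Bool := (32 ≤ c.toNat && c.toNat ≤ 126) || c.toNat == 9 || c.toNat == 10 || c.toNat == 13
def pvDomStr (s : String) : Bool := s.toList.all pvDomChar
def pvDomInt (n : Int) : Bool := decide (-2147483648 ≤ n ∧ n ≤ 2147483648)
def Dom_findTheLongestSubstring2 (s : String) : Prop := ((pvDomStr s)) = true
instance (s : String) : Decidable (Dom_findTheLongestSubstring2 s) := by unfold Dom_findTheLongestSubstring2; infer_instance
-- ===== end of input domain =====

-- B replaces A's O(n^2) restart-at-every-index scan by one pass over the string with a
-- prefix vowel-parity bitmask and a first-occurrence dict (objective: faster).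


-- ===== PORT A =====
-- Python dict d (its keys are the length-1 vowel strings, i.e. Chars)
def pvDictA : PySem.Dict Char Int :=
  PySem.Dict.ofList [('a', 0), ('e', 1), ('i', 2), ('o', 3), ('u', 4)]

-- the body of A's inner loop: toggle the parity array at d[c], then record the window
-- length if all parities are even. s[j] and array[index] are always in range here, so the
-- total pyGetD/pySetD forms are exact; d[c] is guarded by 'c in d.keys()', so getD is exact.
def stepInnerA (s : String) (i : Int) (st : List Bool × Int) (j : Int) : List Bool × Int :=
  let array := st.1
  let ans := st.2
  let c := PySem.List.pyGetD s.toList j ' '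
  let array :=
    if pvDictA.contains c then
      let index := pvDictA.getD c 0
      PySem.List.pySetD array index (!(PySem.List.pyGetD array index true))
    else array
  if array.all (fun b => b) then (array, max ans (j - i + 1)) else (array, ans)

-- literal port of A: for each start i, re-scan s[i:] with a fresh 5-slot parity array
def findTheLongestSubstring2 (s : String) : Int :=
  let n : Int := PySem.Str.len s
  (PySem.List.pyRange 0 n 1).foldl (fun ans i =>
    ((PySem.List.pyRange i n 1).foldl (stepInnerA s i)
      ((PySem.List.pyRange 0 5 1).map (fun _ => true), ans)).2) 0

-- ===== PORT B =====
-- Python dict bit; the masks are the nonnegative ints 0..31, on which Python's ^ is Nat.xor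
def pvDictB : PySem.Dict Char Nat :=
  PySem.Dict.ofList [('a', 1), ('e', 2), ('i', 4), ('o', 8), ('u', 16)]

-- the body of B's loop: xor the char's bit into cur, then either close a window against
-- the first occurrence of cur, or record cur's first occurrence
def stepB (st : PySem.Dict Nat Int × Nat × Int) (p : Int × Char) : PySem.Dict Nat Int × Nat × Int :=
  let first := st.1
  let cur := st.2.1 ^^^ pvDictB.getD p.2 0
  let ans := st.2.2
  match first.get? cur with
  | some v => (first, cur, max ans (p.1 - v))
  | none => (first.insert cur p.1, cur, ans)

-- literal port of B (Source B): one pass with first = {0: -1}, cur = 0, ans = 0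
def findTheLongestSubstring2_alt (s : String) : Int :=
  ((PySem.List.enumerate s.toList 0).foldl stepB (PySem.Dict.ofList [(0, -1)], 0, 0)).2.2

-- ===== PRECONDITION & SPEC =====
def Spec_findTheLongestSubstring2 (s : String) (out : Int) : Prop := out = findTheLongestSubstring2_alt s
instance (s : String) (out : Int) : Decidable (Spec_findTheLongestSubstring2 s out) := by unfold Spec_findTheLongestSubstring2; infer_instance

-- ===== CLAIM (what is proved, stated in full; the proofs are below) =====
def Claim_equal_findTheLongestSubstring2 : Prop := ∀ (s : String), Dom_findTheLongestSubstring2 s → Spec_findTheLongestSubstring2 s (findTheLongestSubstring2 s)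

-- ===== LEMMAS AND PROOFS =====

-- the parity bit contributed by one character
def bitOf (c : Char) : Nat :=
  if c = 'a' then 1 else if c = 'e' then 2 else if c = 'i' then 4
  else if c = 'o' then 8 else if c = 'u' then 16 else 0

-- parity mask of a character list; pmask (cs.take k) is the prefix mask at position k
def pmask (cs : List Char) : Nat := cs.foldl (fun m c => m ^^^ bitOf c) 0

-- A's 5-bool array as a function of the accumulated mask (true = even so far)
def vecOf (m : Nat) : List Bool :=
  [!(m.testBit 0), !(m.testBit 1), !(m.testBit 2), !(m.testBit 3), !(m.testBit 4)]

-- smallest index t whose prefix mask equals the prefix mask at k (t = k always qualifies)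
def firstIdx (cs : List Char) (k : Nat) : Nat :=
  Nat.find (⟨k, rfl⟩ : ∃ t, pmask (cs.take t) = pmask (cs.take k))

-- the candidate window lengths A enumerates, flattened into one list
def valsA (cs : List Char) : List Int :=
  (List.range cs.length).flatMap (fun i =>
    ((List.range' i (cs.length - i)).filter
        (fun j => decide (pmask ((cs.drop i).take (j + 1 - i)) = 0))).map
      (fun (j : Nat) => (j : Int) - (i : Int) + 1))

-- the per-end-position best window lengths B computes
def specVals (cs : List Char) : List Int :=
  (List.range cs.length).map (fun (j : Nat) => ((j : Int) + 1) - (firstIdx cs (j + 1) : Int))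

-- first occurrence ≤ p of a given prefix mask (proof-side mirror of B's dict)
def occ? (cs : List Char) : Nat → Nat → Option Nat
  | 0, m => if pmask (cs.take 0) = m then some 0 else none
  | p + 1, m =>
    match occ? cs p m with
    | some t => some t
    | none => if pmask (cs.take (p + 1)) = m then some (p + 1) else none

-- ---- xor / pmask algebra ----

theorem foldl_xor (l : List Char) (a : Nat) :
    l.foldl (fun m c => m ^^^ bitOf c) a = a ^^^ pmask l := by
  induction l generalizing a with
  | nil => simp [pmask]
  | cons c t ih =>
    rw [List.foldl_cons, ih]
    conv_rhs => rw [pmask, List.foldl_cons, ih]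
    simp [Nat.xor_assoc]

theorem pmask_nil : pmask [] = 0 := rfl

theorem pmask_cons (c : Char) (t : List Char) : pmask (c :: t) = bitOf c ^^^ pmask t := by
  have := foldl_xor t (0 ^^^ bitOf c)
  simpa [pmask] using this

theorem pmask_append (l1 l2 : List Char) : pmask (l1 ++ l2) = pmask l1 ^^^ pmask l2 := by
  simp only [pmask, List.foldl_append]
  exact foldl_xor l2 _

theorem bitOf_lt (c : Char) : bitOf c < 32 := by
  unfold bitOf; split_ifs <;> norm_num

theorem xor_lt_32 : ∀ a < 32, ∀ b < 32, a ^^^ b < 32 := by decide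

-- segment mask vanishes iff the boundary prefix masks agree
theorem seg_zero_iff (cs : List Char) (i k : Nat) (hik : i ≤ k) :
    pmask ((cs.drop i).take (k - i)) = 0 ↔ pmask (cs.take i) = pmask (cs.take k) := by
  have hk : cs.take k = cs.take i ++ (cs.drop i).take (k - i) := by
    conv_lhs => rw [← Nat.add_sub_cancel' hik]
    rw [List.take_add]
  constructor
  · intro h0
    rw [hk, pmask_append, h0, Nat.xor_zero]
  · intro he
    have h2 : pmask (cs.take i) ^^^ pmask (cs.take k) = 0 := by rw [he, Nat.xor_self]
    rw [hk, pmask_append, ← Nat.xor_assoc, Nat.xor_self, Nat.zero_xor] at h2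
    exact h2

theorem pmask_take_succ (cs : List Char) (p : Nat) (hlt : p < cs.length) :
    pmask (cs.take (p + 1)) = pmask (cs.take p) ^^^ bitOf cs[p] := by
  rw [List.take_add, List.drop_eq_getElem_cons hlt, List.take_succ_cons, List.take_zero]
  rw [pmask_append, pmask_cons, pmask_nil, Nat.xor_zero]

-- ---- the literal dicts, described ----

theorem pvDictA_mk : pvDictA = PySem.Dict.mk [('a', 0), ('e', 1), ('i', 2), ('o', 3), ('u', 4)] := rfl
theorem pvDictB_mk : pvDictB = PySem.Dict.mk [('a', 1), ('e', 2), ('i', 4), ('o', 8), ('u', 16)] := rfl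

theorem getD_B (c : Char) : pvDictB.getD c 0 = bitOf c := by
  by_cases h1 : c = 'a'; · subst h1; decide
  by_cases h2 : c = 'e'; · subst h2; decide
  by_cases h3 : c = 'i'; · subst h3; decide
  by_cases h4 : c = 'o'; · subst h4; decide
  by_cases h5 : c = 'u'; · subst h5; decide
  have hc : pvDictB.contains c = false := by
    rw [pvDictB_mk]
    simp [Ne.symm h1, Ne.symm h2, Ne.symm h3, Ne.symm h4, Ne.symm h5]
  rw [PySem.Dict.getD_of_not_contains pvDictB 0 hc]
  unfold bitOf
  simp [h1, h2, h3, h4, h5]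

-- A's array update, as a mask operation
theorem arr_step (c : Char) (msk : Nat) (hm : msk < 32) :
    (if pvDictA.contains c then
       PySem.List.pySetD (vecOf msk) (pvDictA.getD c 0)
         (!(PySem.List.pyGetD (vecOf msk) (pvDictA.getD c 0) true))
     else vecOf msk) = vecOf (msk ^^^ bitOf c) := by
  by_cases h1 : c = 'a'; · subst h1; revert msk; decide
  by_cases h2 : c = 'e'; · subst h2; revert msk; decide
  by_cases h3 : c = 'i'; · subst h3; revert msk; decide
  by_cases h4 : c = 'o'; · subst h4; revert msk; decide
  by_cases h5 : c = 'u'; · subst h5; revert msk; decide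
  have hc : pvDictA.contains c = false := by
    rw [pvDictA_mk]
    simp [Ne.symm h1, Ne.symm h2, Ne.symm h3, Ne.symm h4, Ne.symm h5]
  have hb : bitOf c = 0 := by unfold bitOf; simp [h1, h2, h3, h4, h5]
  rw [hc, hb, Nat.xor_zero]
  simp

theorem all_vec : ∀ msk < 32, ((vecOf msk).all (fun b => b)) = decide (msk = 0) := by decide

-- ---- generic fold-max shapes ----

theorem gfold (P : Nat → Prop) [DecidablePred P] (g : Nat → Int) :
    ∀ (l : List Nat) (a : Int),
      l.foldl (fun x j => if P j then max x (g j) else x) a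
        = ((l.filter (fun j => decide (P j))).map g).foldl max a := by
  intro l
  induction l with
  | nil => intro a; simp
  | cons j t ih =>
    intro a
    by_cases h : P j <;> simp [h, ih]

theorem foldl_flat (L : Nat → List Int) :
    ∀ (l : List Nat) (a : Int),
      l.foldl (fun x i => (L i).foldl max x) a = (l.flatMap L).foldl max a := by
  intro l
  induction l with
  | nil => intro a; simp
  | cons i t ih => intro a; simp [List.foldl_append, ih]

-- ---- A's inner loop, characterised ----

theorem innerA (s : String) (cs : List Char) (hs : s.toList = cs) (iN : Nat) :
    ∀ (c m msk : Nat) (ans : Int), msk < 32 → m + c = cs.length →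
      (PySem.List.pyRange (m : Int) (cs.length : Int) 1).foldl (stepInnerA s (iN : Int)) (vecOf msk, ans)
        = (vecOf (msk ^^^ pmask (cs.drop m)),
           (List.range' m c).foldl
             (fun a j => if msk ^^^ pmask ((cs.drop m).take (j + 1 - m)) = 0
               then max a ((j : Int) - (iN : Int) + 1) else a) ans) := by
  intro c
  induction c with
  | zero =>
    intro m msk ans _ hm
    have hm' : m = cs.length := by omega
    subst hm'
    rw [PySem.List.pyRange_one_eq_nil (le_refl _)]
    simp [List.drop_length, pmask_nil]
  | succ c ih =>
    intro m msk ans hmsk hm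
    have hlt : m < cs.length := by omega
    have hgetm : cs.drop m = cs[m] :: cs.drop (m + 1) := List.drop_eq_getElem_cons hlt
    have hstep :
        stepInnerA s (iN : Int) (vecOf msk, ans) (m : Int)
          = (vecOf (msk ^^^ bitOf cs[m]),
             if msk ^^^ bitOf cs[m] = 0 then max ans ((m : Int) - (iN : Int) + 1) else ans) := by
      simp only [stepInnerA, hs]
      rw [show PySem.List.pyGetD cs (m : Int) ' ' = cs[m] by
        simp [PySem.List.pyGetD_natCast, hlt]]
      rw [arr_step cs[m] msk hmsk]
      rw [all_vec _ (xor_lt_32 _ hmsk _ (bitOf_lt _))]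
      by_cases h0 : msk ^^^ bitOf cs[m] = 0 <;> simp [h0]
    rw [PySem.List.pyRange_one_cons (by exact_mod_cast hlt)]
    rw [List.foldl_cons, hstep]
    rw [show (m : Int) + 1 = ((m + 1 : Nat) : Int) by push_cast; ring]
    rw [ih (m + 1) (msk ^^^ bitOf cs[m]) _ (xor_lt_32 _ hmsk _ (bitOf_lt _)) (by omega)]
    rw [List.range'_succ]
    rw [List.foldl_cons]
    rw [Prod.mk.injEq]
    constructor
    · -- array components agree
      rw [hgetm, pmask_cons, Nat.xor_assoc]
    · -- running max components agree
      have hhead :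
          (if msk ^^^ pmask ((cs.drop m).take (m + 1 - m)) = 0
            then max ans ((m : Int) - (iN : Int) + 1) else ans)
          = (if msk ^^^ bitOf cs[m] = 0 then max ans ((m : Int) - (iN : Int) + 1) else ans) := by
        rw [show m + 1 - m = 1 by omega, hgetm, List.take_succ_cons, List.take_zero,
          pmask_cons, pmask_nil, Nat.xor_zero]
      rw [← hhead]
      apply PySem.List.foldl_congr_mem
      intro a j hj
      have hj1 : m + 1 ≤ j := (List.mem_range'_1.mp hj).1
      have hseg : (cs.drop m).take (j + 1 - m)
          = cs[m] :: (cs.drop (m + 1)).take (j + 1 - (m + 1)) := by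
        rw [hgetm, show j + 1 - m = (j + 1 - (m + 1)) + 1 by omega, List.take_succ_cons]
      rw [hseg, pmask_cons, ← Nat.xor_assoc]

-- A's value is the running max of all its candidate window lengths
theorem findTheLongestSubstring2_A_eq (s : String) :
    findTheLongestSubstring2 s = (valsA s.toList).foldl max 0 := by
  show ((PySem.List.pyRange 0 (PySem.Str.len s) 1).foldl (fun ans i =>
    ((PySem.List.pyRange i (PySem.Str.len s) 1).foldl (stepInnerA s i)
      ((PySem.List.pyRange 0 5 1).map (fun _ => true), ans)).2) 0) = _
  rw [show PySem.Str.len s = (s.toList.length : Int) by simp]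
  have hvec : ((PySem.List.pyRange 0 5 1).map (fun _ => true)) = vecOf 0 := by decide
  rw [hvec, PySem.List.pyRange_one]
  simp only [sub_zero, Int.toNat_natCast, zero_add]
  rw [List.foldl_map]
  have hcong :
      (List.range s.toList.length).foldl
        (fun ans (i : Nat) =>
          ((PySem.List.pyRange (i : Int) ((s.toList.length : Int)) 1).foldl
            (stepInnerA s (i : Int)) (vecOf 0, ans)).2) 0
      = (List.range s.toList.length).foldl
        (fun ans (i : Nat) =>
          (((List.range' i (s.toList.length - i)).filter
              (fun j => decide (pmask ((s.toList.drop i).take (j + 1 - i)) = 0))).map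
            (fun (j : Nat) => (j : Int) - (i : Int) + 1)).foldl max ans) 0 := by
    apply PySem.List.foldl_congr_mem
    intro ans i hi
    rw [innerA s s.toList rfl i (s.toList.length - i) i 0 ans (by decide)
        (by have := List.mem_range.mp hi; omega)]
    simp only [Nat.zero_xor]
    exact gfold _ _ _ _
  rw [hcong, foldl_flat]
  rfl

-- ---- occ? characterised ----

theorem occ?_none (cs : List Char) (p m : Nat) (h : occ? cs p m = none) :
    ∀ t ≤ p, pmask (cs.take t) ≠ m := by
  induction p with
  | zero =>
    intro t ht hc
    have ht0 : t = 0 := by omega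
    subst ht0
    simp only [occ?] at h
    rw [if_pos hc] at h
    simp at h
  | succ p ih =>
    intro t ht hc
    simp only [occ?] at h
    rcases h' : occ? cs p m with _ | t'
    · rw [h'] at h
      simp only at h
      rcases Nat.lt_or_ge t (p + 1) with h1 | h1
      · exact ih h' t (by omega) hc
      · have ht' : t = p + 1 := by omega
        subst ht'
        rw [if_pos hc] at h
        simp at h
    · rw [h'] at h
      simp at h

theorem occ?_some (cs : List Char) (p m t : Nat) (h : occ? cs p m = some t) :
    t ≤ p ∧ pmask (cs.take t) = m ∧ ∀ u < t, pmask (cs.take u) ≠ m := by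
  induction p with
  | zero =>
    by_cases hc : pmask (cs.take 0) = m
    · simp only [occ?] at h
      rw [if_pos hc] at h
      have ht0 : 0 = t := Option.some.inj h
      subst ht0
      exact ⟨le_refl _, hc, by omega⟩
    · simp only [occ?] at h
      rw [if_neg hc] at h
      simp at h
  | succ p ih =>
    simp only [occ?] at h
    rcases h' : occ? cs p m with _ | t'
    · rw [h'] at h
      simp only at h
      by_cases hc : pmask (cs.take (p + 1)) = m
      · rw [if_pos hc] at h
        have ht0 : p + 1 = t := Option.some.inj h
        subst ht0
        exact ⟨le_refl _, hc, fun u hu => occ?_none cs p m h' u (by omega)⟩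
      · rw [if_neg hc] at h
        simp at h
    · rw [h'] at h
      have ht0 : t' = t := Option.some.inj h
      subst ht0
      obtain ⟨h1, h2, h3⟩ := ih h'
      exact ⟨by omega, h2, h3⟩

-- ---- B's loop, characterised ----

theorem Bloop (cs : List Char) :
    ∀ (l : List Char) (p : Nat) (first : PySem.Dict Nat Int) (cur : Nat) (ans : Int),
      cs.drop p = l →
      cur = pmask (cs.take p) →
      (∀ m : Nat, first.get? m = (occ? cs p m).map (fun (t : Nat) => (t : Int) - 1)) →
      0 ≤ ans →
      ((PySem.List.enumerate l (p : Int)).foldl stepB (first, cur, ans)).2.2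
        = (List.range' p (cs.length - p)).foldl
            (fun a (j : Nat) => max a (((j : Int) + 1) - (firstIdx cs (j + 1) : Int))) ans := by
  intro l
  induction l with
  | nil =>
    intro p first cur ans hdrop _ _ _
    have hp : cs.length ≤ p := by
      have := congrArg List.length hdrop
      simp at this
      omega
    rw [PySem.List.enumerate_nil]
    simp [Nat.sub_eq_zero_of_le hp]
  | cons ch l' ih =>
    intro p first cur ans hdrop hcur hfirst hans
    subst hcur
    have hlt : p < cs.length := by
      by_contra hge
      rw [List.drop_eq_nil_of_le (by omega)] at hdrop
      simp at hdrop
    have hget : cs.drop p = cs[p] :: cs.drop (p + 1) := List.drop_eq_getElem_cons hlt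
    have hch : cs[p] = ch := by rw [hdrop] at hget; exact (List.cons.injEq _ _ _ _ ▸ hget.symm).1
    have hdrop' : cs.drop (p + 1) = l' := by rw [hdrop] at hget; exact (List.cons.injEq _ _ _ _ ▸ hget.symm).2
    have hcur : pmask (cs.take p) ^^^ pvDictB.getD ch 0 = pmask (cs.take (p + 1)) := by
      rw [getD_B, ← hch, pmask_take_succ cs p hlt]
    rw [PySem.List.enumerate_cons, List.foldl_cons]
    have hrange : List.range' p (cs.length - p) = p :: List.range' (p + 1) (cs.length - (p + 1)) := by
      rw [show cs.length - p = (cs.length - (p + 1)) + 1 by omega, List.range'_succ]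
    have hcast : (p : Int) + 1 = ((p + 1 : Nat) : Int) := by push_cast; ring
    rcases hocc : occ? cs p (pmask (cs.take (p + 1))) with _ | t
    · -- mask unseen: insert, spec term at p is 0
      have hstep : stepB (first, pmask (cs.take p), ans) ((p : Int), ch)
          = (first.insert (pmask (cs.take (p + 1))) (p : Int), pmask (cs.take (p + 1)), ans) := by
        simp only [stepB, hcur, hfirst, hocc]
        rfl
      rw [hstep]
      have hfi : firstIdx cs (p + 1) = p + 1 := by
        unfold firstIdx
        rw [Nat.find_eq_iff]
        exact ⟨rfl, fun u hu => occ?_none cs p _ hocc u (by omega)⟩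
      have hocc1 : occ? cs (p + 1) (pmask (cs.take (p + 1))) = some (p + 1) := by
        simp only [occ?]
        rw [hocc]
        simp
      have hinv : ∀ m : Nat,
          (first.insert (pmask (cs.take (p + 1))) (p : Int)).get? m
            = (occ? cs (p + 1) m).map (fun (t : Nat) => (t : Int) - 1) := by
        intro m
        rw [PySem.Dict.get?_insert]
        by_cases hm : m = pmask (cs.take (p + 1))
        · subst hm
          rw [if_pos rfl, hocc1, Option.map_some]
          rw [Option.some.injEq]
          push_cast; ring
        · rw [if_neg hm, hfirst m]
          simp only [occ?]
          rcases h' : occ? cs p m with _ | t'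
          · simp only
            rw [if_neg (fun hc => hm hc.symm)]
          · rfl
      rw [hcast]
      rw [ih (p + 1) _ (pmask (cs.take (p + 1))) ans hdrop'
        (by rfl) hinv hans]
      rw [hrange, List.foldl_cons, hfi]
      rw [show max ans (((p : Nat) : Int) + 1 - ((p + 1 : Nat) : Int)) = ans by
        rw [show ((p : Nat) : Int) + 1 - ((p + 1 : Nat) : Int) = 0 by push_cast; ring]
        exact max_eq_left hans]
    · -- mask seen before at t: window closes, dict unchanged
      obtain ⟨htp, hteq, htmin⟩ := occ?_some cs p _ t hocc
      have hstep : stepB (first, pmask (cs.take p), ans) ((p : Int), ch)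
          = (first, pmask (cs.take (p + 1)), max ans ((p : Int) - ((t : Int) - 1))) := by
        simp only [stepB, hcur, hfirst, hocc]
        rfl
      rw [hstep]
      have hfi : firstIdx cs (p + 1) = t := by
        unfold firstIdx
        rw [Nat.find_eq_iff]
        exact ⟨hteq, fun u hu => htmin u hu⟩
      have hinv : ∀ m : Nat, first.get? m = (occ? cs (p + 1) m).map (fun (t : Nat) => (t : Int) - 1) := by
        intro m
        rw [hfirst m]
        simp only [occ?]
        rcases h' : occ? cs p m with _ | t'
        · simp only
          rw [if_neg]
          intro hc
          rw [hc] at hocc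
          rw [hocc] at h'
          simp at h'
        · rfl
      rw [hcast]
      rw [ih (p + 1) first (pmask (cs.take (p + 1))) _ hdrop' (by rfl) hinv
        (le_trans hans (le_max_left _ _))]
      rw [hrange, List.foldl_cons, hfi]
      congr 2
      ring

theorem findTheLongestSubstring2_B_eq (s : String) :
    findTheLongestSubstring2_alt s = (specVals s.toList).foldl max 0 := by
  unfold findTheLongestSubstring2_alt
  have hfirst : ∀ m : Nat, (PySem.Dict.ofList [(0, -1)] : PySem.Dict Nat Int).get? m
      = (occ? s.toList 0 m).map (fun (t : Nat) => (t : Int) - 1) := by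
    intro m
    by_cases hm : m = 0
    · subst hm
      have h1 : occ? s.toList 0 0 = some 0 := by
        simp only [occ?]
        rw [if_pos (by simp [pmask])]
      rw [h1]
      rfl
    · have h1 : occ? s.toList 0 m = none := by
        simp only [occ?]
        rw [if_neg]
        intro h
        exact hm (by simpa [pmask] using h.symm)
      rw [h1]
      rw [show (PySem.Dict.ofList [((0 : Nat), (-1 : Int))]) = PySem.Dict.mk [(0, -1)] from rfl]
      rw [PySem.Dict.get?_mk_cons]
      simp [Ne.symm hm, PySem.Dict.get?]
  have H := Bloop s.toList s.toList 0 (PySem.Dict.ofList [(0, -1)]) 0 0 rfl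
    (by simp [pmask]) hfirst (le_refl 0)
  rw [show ((0 : Nat) : Int) = (0 : Int) from rfl] at H
  rw [H]
  rw [specVals, List.foldl_map, List.range_eq_range']
  simp

theorem valsA_eq_spec (cs : List Char) :
    (valsA cs).foldl max 0 = (specVals cs).foldl max 0 := by
  apply le_antisymm
  · rcases PySem.List.foldl_max_mem (valsA cs) 0 with h | h
    · rw [h]; exact (PySem.List.le_foldl_max (specVals cs) 0).1
    · obtain ⟨i, hi, hv⟩ := List.mem_flatMap.mp h
      obtain ⟨j, hj, hveq⟩ := List.mem_map.mp hv
      obtain ⟨hjr, hguard⟩ := List.mem_filter.mp hj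
      have hi' : i < cs.length := List.mem_range.mp hi
      have hjb := List.mem_range'_1.mp hjr
      have hjlen : j < cs.length := by omega
      have hg : pmask ((cs.drop i).take (j + 1 - i)) = 0 := of_decide_eq_true hguard
      have heq : pmask (cs.take i) = pmask (cs.take (j + 1)) :=
        (seg_zero_iff cs i (j + 1) (by omega)).mp hg
      have hfi : firstIdx cs (j + 1) ≤ i := by unfold firstIdx; exact Nat.find_le heq
      have hmem : ((j : Int) + 1) - (firstIdx cs (j + 1) : Int) ∈ specVals cs :=
        List.mem_map.mpr ⟨j, List.mem_range.mpr hjlen, rfl⟩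
      have hle := (PySem.List.le_foldl_max (specVals cs) 0).2 _ hmem
      calc (valsA cs).foldl max 0 = (j : Int) - i + 1 := hveq.symm
        _ ≤ ((j : Int) + 1) - (firstIdx cs (j + 1) : Int) := by
            have hfi' : ((firstIdx cs (j + 1) : Nat) : Int) ≤ (i : Int) := by exact_mod_cast hfi
            omega
        _ ≤ (specVals cs).foldl max 0 := hle
  · rcases PySem.List.foldl_max_mem (specVals cs) 0 with h | h
    · rw [h]; exact (PySem.List.le_foldl_max (valsA cs) 0).1
    · obtain ⟨j, hjr, hveq⟩ := List.mem_map.mp h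
      have hj : j < cs.length := List.mem_range.mp hjr
      have htle : firstIdx cs (j + 1) ≤ j + 1 := by unfold firstIdx; exact Nat.find_le rfl
      have hspec : pmask (cs.take (firstIdx cs (j + 1))) = pmask (cs.take (j + 1)) := by
        unfold firstIdx
        exact Nat.find_spec (⟨j + 1, rfl⟩ : ∃ t, pmask (cs.take t) = pmask (cs.take (j + 1)))
      rcases Nat.eq_or_lt_of_le htle with hteq | htlt
      · calc (specVals cs).foldl max 0 = ((j : Int) + 1) - (firstIdx cs (j + 1) : Int) := hveq.symm
          _ = 0 := by rw [hteq]; push_cast; ring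
          _ ≤ (valsA cs).foldl max 0 := (PySem.List.le_foldl_max (valsA cs) 0).1
      · have htj : firstIdx cs (j + 1) ≤ j := by omega
        have hmem : ((j : Int) - (firstIdx cs (j + 1) : Int) + 1) ∈ valsA cs := by
          apply List.mem_flatMap.mpr
          refine ⟨firstIdx cs (j + 1), List.mem_range.mpr (by omega), ?_⟩
          apply List.mem_map.mpr
          refine ⟨j, ?_, rfl⟩
          apply List.mem_filter.mpr
          refine ⟨List.mem_range'_1.mpr ⟨htj, by omega⟩, ?_⟩
          exact decide_eq_true ((seg_zero_iff cs (firstIdx cs (j + 1)) (j + 1) (by omega)).mpr hspec)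
        have hle := (PySem.List.le_foldl_max (valsA cs) 0).2 _ hmem
        calc (specVals cs).foldl max 0 = ((j : Int) + 1) - (firstIdx cs (j + 1) : Int) := hveq.symm
          _ = (j : Int) - (firstIdx cs (j + 1) : Int) + 1 := by ring
          _ ≤ (valsA cs).foldl max 0 := hle

-- ===== VERDICT (by name: the statement is the Claim_ definition above) =====
theorem findTheLongestSubstring2_spec : Claim_equal_findTheLongestSubstring2 := by
  intro s _
  show _ = _
  rw [findTheLongestSubstring2_A_eq, findTheLongestSubstring2_B_eq, valsA_eq_spec]
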